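-- pv_equiv track=rewrite | github.com/SoumyaPratik12/RAG-Assistant | app/routes/query.py | is_summary_request
-- ===== SOURCE A (Python) =====
-- def is_summary_request(question: str) -> bool:
--     q = question.lower()
--     summary_markers = (
--         "summarize",
--         "summarise",
--         "summary",
--         "overview",
--         "main topics",
--         "what is this file about",
--         "what is the file about",
--         "key points",
--     )
--     return any(marker in q for marker in summary_markers)
-- ===== SOURCE B (Python) =====
-- def is_summary_request(question: str) -> bool:
--     q = question.lower()
--     summary_markers = (
--         "summarize",
--         "summarise",
--         "summary",
--         "overview",
--         "main topics",
--         "what is this file about",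
--         "what is the file about",
--         "key points",
--     )
--     # single pass over positions: at each index, test whether some marker starts there
--     for i in range(len(q) + 1):
--         if any(q.startswith(m, i) for m in summary_markers):
--             return True
--     return False
-- ===== Notes on version B (the rewrite author's own statement) =====
-- stated objective: alternative
-- what changed: Instead of running a separate substring scan per marker (any(marker in q)), B walks the lowered text once position by position and at each index tests whether some marker starts there with str.startswith(m, i).
import Mathlib
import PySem

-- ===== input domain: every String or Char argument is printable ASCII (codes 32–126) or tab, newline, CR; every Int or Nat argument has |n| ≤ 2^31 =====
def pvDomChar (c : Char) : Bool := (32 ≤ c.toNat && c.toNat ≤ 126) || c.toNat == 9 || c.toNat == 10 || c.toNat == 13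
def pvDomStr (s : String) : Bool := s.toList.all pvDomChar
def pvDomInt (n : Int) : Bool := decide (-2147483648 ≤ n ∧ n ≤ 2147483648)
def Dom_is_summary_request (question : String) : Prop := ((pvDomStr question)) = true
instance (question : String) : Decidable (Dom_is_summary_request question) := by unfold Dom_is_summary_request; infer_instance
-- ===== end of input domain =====

-- B replaces eight per-marker substring scans by one position-by-position scan of the text; return values identical.
-- ===== PORT A =====
def pvMarkers : List String :=
  ["summarize", "summarise", "summary", "overview", "main topics",
   "what is this file about", "what is the file about", "key points"]

def is_summary_request (question : String) : Bool :=
  let q := PySem.Str.lower question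
  pvMarkers.any (fun marker => PySem.Str.isIn marker q)

-- ===== PORT B =====
-- markers as character lists, for the position scan
def pvMarkersC : List (List Char) := pvMarkers.map String.toList

-- for i in range(len(q)+1): if any(q.startswith(m, i) ...): return True  -- one step per position
def pvScan : List Char → Bool
  | [] => pvMarkersC.any (fun m => PySem.Chars.startswith [] m)
  | c :: t =>
      pvMarkersC.any (fun m => PySem.Chars.startswith (c :: t) m) || pvScan t

def is_summary_request_alt (question : String) : Bool :=
  pvScan (PySem.Str.lower question).toList

-- ===== PRECONDITION & SPEC =====
def Spec_is_summary_request (question : String) (out : Bool) : Prop := out = is_summary_request_alt question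
instance (question : String) (out : Bool) : Decidable (Spec_is_summary_request question out) := by unfold Spec_is_summary_request; infer_instance

-- ===== CLAIM (what is proved, stated in full; the proofs are below) =====
def Claim_equal_is_summary_request : Prop := ∀ (question : String), Dom_is_summary_request question → Spec_is_summary_request question (is_summary_request question)

-- ===== LEMMAS AND PROOFS =====
lemma pvScan_eq (s : List Char) :
    pvScan s = pvMarkersC.any (fun m => PySem.Chars.isIn m s) := by
  induction s with
  | nil => decide
  | cons c t ih =>
      rw [pvScan, ih, Bool.eq_iff_iff]
      simp only [Bool.or_eq_true, List.any_eq_true, PySem.Chars.startswith_iff,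
        PySem.Chars.isIn_iff_infix, List.infix_cons_iff]
      constructor
      · rintro (⟨m, hm, h⟩ | ⟨m, hm, h⟩)
        · exact ⟨m, hm, Or.inl h⟩
        · exact ⟨m, hm, Or.inr h⟩
      · rintro ⟨m, hm, h | h⟩
        · exact Or.inl ⟨m, hm, h⟩
        · exact Or.inr ⟨m, hm, h⟩

-- ===== VERDICT (by name: the statement is the Claim_ definition above) =====
theorem is_summary_request_spec : Claim_equal_is_summary_request := by
  intro question _
  unfold Spec_is_summary_request is_summary_request is_summary_request_alt
  rw [pvScan_eq]
  simp only [pvMarkersC, List.any_map, Function.comp_def, PySem.Str.isIn]
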